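-- pv_equiv track=rewrite | github.com/paulsuh/AdventOfCode-2024 | Day12-2-failed.py | calc_boundaries
-- ===== SOURCE A (Python) =====
-- def calc_boundaries(region: set[tuple[int, int]]
--                     ) -> set[tuple[tuple[int, int], tuple[int, int]]]:
--     # returns a set of (inside, outside) pairs
--     result = set()
--     for one_cell in region:
--         cell_row, cell_col = one_cell
--         if (cell_row-1, cell_col) not in region:
--             result.add((one_cell, (cell_row-1, cell_col)))
--         if (cell_row, cell_col-1) not in region:
--             result.add((one_cell, (cell_row, cell_col-1)))
--         if (cell_row, cell_col+1) not in region: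
--             result.add((one_cell, (cell_row, cell_col+1)))
--         if (cell_row+1, cell_col) not in region:
--             result.add((one_cell, (cell_row+1, cell_col)))
--     return result
-- ===== SOURCE B (Python) =====
-- def calc_boundaries(region: set[tuple[int, int]]
--                     ) -> set[tuple[tuple[int, int], tuple[int, int]]]:
--     # returns a set of (inside, outside) pairs
--     # Staged pipeline: enumerate every directed cell->neighbour edge, compute the
--     # outside frontier once by one global set subtraction, then keep the edges
--     # that land in the frontier.
--     deltas = ((-1, 0), (0, -1), (0, 1), (1, 0))
--     edges = [((r, c), (r + dr, c + dc)) for r, c in region for dr, dc in deltas]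
--     frontier = {o for _, o in edges} - region
--     return {e for e in edges if e[1] in frontier}
-- ===== Notes on version B (the rewrite author's own statement) =====
-- stated objective: alternative
-- what changed: B is a staged pipeline: it first enumerates all 4n directed cell-to-neighbour edges from a direction table, then computes the outside frontier once by a single global set subtraction (all edge endpoints minus the region), and finally keeps the edges whose endpoint lies in that frontier; A instead makes four unrolled 'not in' membership tests per cell and conditionally inserts into the result in one pass.
import Mathlib
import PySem

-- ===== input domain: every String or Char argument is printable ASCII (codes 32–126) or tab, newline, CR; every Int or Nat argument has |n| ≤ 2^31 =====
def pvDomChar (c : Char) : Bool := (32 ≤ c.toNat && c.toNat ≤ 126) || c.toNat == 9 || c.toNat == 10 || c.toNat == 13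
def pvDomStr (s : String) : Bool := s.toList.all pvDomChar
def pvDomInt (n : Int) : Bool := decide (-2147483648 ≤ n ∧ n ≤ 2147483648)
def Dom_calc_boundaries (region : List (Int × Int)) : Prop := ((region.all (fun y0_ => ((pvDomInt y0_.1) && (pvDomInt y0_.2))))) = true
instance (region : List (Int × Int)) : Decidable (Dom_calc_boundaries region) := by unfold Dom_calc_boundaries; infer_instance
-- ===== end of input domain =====

-- B replaces A's per-cell membership tests by a staged pipeline: enumerate all directed
-- edges, one global set subtraction for the frontier, then select edges; objective: alternative.


-- ===== PORT A =====
-- the loop body of A (verbatim: four 'not in' tests, each followed by a conditional add)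
def pvStepA (region : List (Int × Int)) (result : List ((Int × Int) × (Int × Int)))
    (one_cell : Int × Int) : List ((Int × Int) × (Int × Int)) :=
  let cell_row := one_cell.1
  let cell_col := one_cell.2
  let result := if !(PySem.Set.contains region (cell_row - 1, cell_col)) then
      PySem.Set.add result (one_cell, (cell_row - 1, cell_col)) else result
  let result := if !(PySem.Set.contains region (cell_row, cell_col - 1)) then
      PySem.Set.add result (one_cell, (cell_row, cell_col - 1)) else result
  let result := if !(PySem.Set.contains region (cell_row, cell_col + 1)) then
      PySem.Set.add result (one_cell, (cell_row, cell_col + 1)) else result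
  let result := if !(PySem.Set.contains region (cell_row + 1, cell_col)) then
      PySem.Set.add result (one_cell, (cell_row + 1, cell_col)) else result
  result

def calc_boundaries (region : List (Int × Int)) : List ((Int × Int) × (Int × Int)) :=
  region.foldl (pvStepA region) PySem.Set.empty

-- ===== PORT B =====
-- the direction table
def pvDeltas : List (Int × Int) := [(-1, 0), (0, -1), (0, 1), (1, 0)]

def calc_boundaries_alt (region : List (Int × Int)) : List ((Int × Int) × (Int × Int)) :=
  let edges := region.flatMap (fun cell =>
    pvDeltas.map (fun d => (cell, (cell.1 + d.1, cell.2 + d.2))))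
  let frontier := PySem.Set.diff (PySem.Set.ofList (edges.map (fun e => e.2))) region
  PySem.Set.ofList (edges.filter (fun e => PySem.Set.contains frontier e.2))

-- ===== PRECONDITION & SPEC =====
def Spec_calc_boundaries (region : List (Int × Int)) (out : List ((Int × Int) × (Int × Int))) : Prop := out = calc_boundaries_alt region
instance (region : List (Int × Int)) (out : List ((Int × Int) × (Int × Int))) : Decidable (Spec_calc_boundaries region out) := by unfold Spec_calc_boundaries; infer_instance

-- ===== CLAIM (what is proved, stated in full; the proofs are below) =====
def Claim_equal_calc_boundaries : Prop := ∀ (region : List (Int × Int)), Dom_calc_boundaries region → Spec_calc_boundaries region (calc_boundaries region)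

-- ===== LEMMAS AND PROOFS =====

-- abbreviation for the proofs: the four edges of one cell
def pvEdges (cell : Int × Int) : List ((Int × Int) × (Int × Int)) :=
  pvDeltas.map (fun d => (cell, (cell.1 + d.1, cell.2 + d.2)))

-- A's loop body = folding Set.add over the cell's edges filtered by "endpoint outside region"
theorem pv_stepA_eq_foldl (region : List (Int × Int))
    (res : List ((Int × Int) × (Int × Int))) (cell : Int × Int) :
    pvStepA region res cell =
      ((pvEdges cell).filter
        (fun e => !(PySem.Set.contains region e.2))).foldl PySem.Set.add res := by
  obtain ⟨r, c⟩ := cell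
  unfold pvStepA pvEdges pvDeltas
  by_cases h1 : ((r + -1, c) : Int × Int) ∈ region <;>
    by_cases h2 : ((r, c + -1) : Int × Int) ∈ region <;>
      by_cases h3 : ((r, c + 1) : Int × Int) ∈ region <;>
        by_cases h4 : ((r + 1, c) : Int × Int) ∈ region <;>
          simp [h1, h2, h3, h4, List.filter, List.foldl, sub_eq_add_neg]

-- membership in the frontier coincides with non-membership in the region, for edge endpoints
theorem pv_frontier_contains (region edgesSnd : List (Int × Int)) (x : Int × Int)
    (hx : x ∈ edgesSnd) :
    PySem.Set.contains (PySem.Set.diff (PySem.Set.ofList edgesSnd) region) x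
      = !(PySem.Set.contains region x) := by
  by_cases h : x ∈ region <;>
    simp [PySem.Set.mem_diff, PySem.Set.mem_ofList, hx, h]

-- the main fold identity: A's single pass equals the fold over the filtered edge list
theorem pv_fold_eq (region l : List (Int × Int))
    (res : List ((Int × Int) × (Int × Int))) :
    l.foldl (pvStepA region) res =
      ((l.flatMap pvEdges).filter
        (fun e => !(PySem.Set.contains region e.2))).foldl PySem.Set.add res := by
  induction l generalizing res with
  | nil => rfl
  | cons x xs ih =>
    rw [List.foldl_cons, List.flatMap_cons, List.filter_append, List.foldl_append,
      pv_stepA_eq_foldl, ih]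

-- ===== VERDICT (by name: the statement is the Claim_ definition above) =====
theorem calc_boundaries_spec : Claim_equal_calc_boundaries := by
  intro region _
  unfold Spec_calc_boundaries calc_boundaries calc_boundaries_alt
  have hfc : (region.flatMap (fun cell =>
        pvDeltas.map (fun d => (cell, (cell.1 + d.1, cell.2 + d.2))))).filter
        (fun e => !(PySem.Set.contains region e.2)) =
      (region.flatMap (fun cell =>
        pvDeltas.map (fun d => (cell, (cell.1 + d.1, cell.2 + d.2))))).filter
        (fun e => PySem.Set.contains (PySem.Set.diff
          (PySem.Set.ofList ((region.flatMap (fun cell =>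
            pvDeltas.map (fun d => (cell, (cell.1 + d.1, cell.2 + d.2))))).map
              (fun e => e.2))) region) e.2) := by
    apply List.filter_congr
    intro e he
    rw [pv_frontier_contains]
    exact List.mem_map_of_mem he
  rw [pv_fold_eq region region PySem.Set.empty, PySem.Set.ofList_eq_foldl]
  show _ = List.foldl PySem.Set.add PySem.Set.empty _
  rw [← hfc]
  rfl
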